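-- pv_equiv track=rewrite | github.com/johnnyw66/picoflipperzero | tools/analyse.py | find_frames
-- ===== SOURCE A (Python) =====
-- def find_frames(cleaned_timings, frame_gap=3000):
--     frames = []
--     current_frame = []
--
--     for time in cleaned_timings:
--         if time == 4000:  # Assuming a 4000 µs gap signifies a frame boundary
--             if current_frame:
--                 frames.append(current_frame)
--                 current_frame = []
--         else:
--             current_frame.append(time)
--
--     if current_frame:
--         frames.append(current_frame)  # Add the last frame if it exists
--
--     return frames
-- ===== SOURCE B (Python) =====
-- def find_frames(cleaned_timings, frame_gap=3000):
--     frames = []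
--     i, n = 0, len(cleaned_timings)
--     while i < n:
--         if cleaned_timings[i] == 4000:
--             i += 1
--         else:
--             j = i
--             while j < n and cleaned_timings[j] != 4000:
--                 j += 1
--             frames.append(cleaned_timings[i:j])
--             i = j
--     return frames
-- ===== Notes on version B (the rewrite author's own statement) =====
-- stated objective: alternative
-- what changed: Replaces the element-by-element accumulator loop with index-based run extraction: an inner scan finds the end of each maximal non-4000 run and the whole run is sliced out at once, so no current_frame state is maintained.
import Mathlib
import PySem

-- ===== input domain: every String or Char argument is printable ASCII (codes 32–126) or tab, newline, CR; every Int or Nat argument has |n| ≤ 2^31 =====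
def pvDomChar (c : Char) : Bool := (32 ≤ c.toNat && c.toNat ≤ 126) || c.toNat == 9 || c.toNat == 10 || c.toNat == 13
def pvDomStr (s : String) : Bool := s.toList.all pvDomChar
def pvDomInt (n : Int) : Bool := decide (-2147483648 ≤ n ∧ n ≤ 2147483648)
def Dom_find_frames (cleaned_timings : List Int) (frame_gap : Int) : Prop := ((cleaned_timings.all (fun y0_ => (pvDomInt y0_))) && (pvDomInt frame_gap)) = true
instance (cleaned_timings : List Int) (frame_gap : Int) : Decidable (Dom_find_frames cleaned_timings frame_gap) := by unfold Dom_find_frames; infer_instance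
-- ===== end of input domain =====

-- B replaces A's accumulator loop by maximal-run extraction (equal cost); return-value equivalence proved.
-- ===== PORT A =====
-- state = (frames, current_frame); per-element step mirrors A's loop body
def find_frames (cleaned_timings : List Int) (frame_gap : Int) : List (List Int) :=
  let st := cleaned_timings.foldl
    (fun (p : List (List Int) × List Int) time =>
      if time == 4000 then
        (if p.2 ≠ [] then (p.1 ++ [p.2], ([] : List Int)) else p)
      else
        (p.1, p.2 ++ [time]))
    ([], [])
  if st.2 ≠ [] then st.1 ++ [st.2] else st.1

-- ===== PORT B =====
-- B's outer while-loop: skip a 4000 marker, or slice out the maximal non-4000 run and jump past it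
def altGroups : List Int → List (List Int)
  | [] => []
  | t :: ts =>
    if t == 4000 then altGroups ts
    else (t :: ts.takeWhile (fun x => !(x == 4000))) :: altGroups (ts.dropWhile (fun x => !(x == 4000)))
termination_by l => l.length
decreasing_by
  · simp
  · have := List.length_dropWhile_le (p := fun x => !(x == 4000)) (l := ts)
    simp only [List.length_cons]; omega

def find_frames_alt (cleaned_timings : List Int) (frame_gap : Int) : List (List Int) :=
  altGroups cleaned_timings

-- ===== PRECONDITION & SPEC =====
def Spec_find_frames (cleaned_timings : List Int) (frame_gap : Int) (out : List (List Int)) : Prop := out = find_frames_alt cleaned_timings frame_gap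
instance (cleaned_timings : List Int) (frame_gap : Int) (out : List (List Int)) : Decidable (Spec_find_frames cleaned_timings frame_gap out) := by unfold Spec_find_frames; infer_instance

-- ===== CLAIM (what is proved, stated in full; the proofs are below) =====
def Claim_equal_find_frames : Prop := ∀ (cleaned_timings : List Int) (frame_gap : Int), Dom_find_frames cleaned_timings frame_gap → Spec_find_frames cleaned_timings frame_gap (find_frames cleaned_timings frame_gap)

-- ===== LEMMAS AND PROOFS =====

-- ===== VERDICT (by name: the statement is the Claim_ definition above) =====
-- the glue between A's pending accumulator and B's run decomposition
def auxGlue (cur : List Int) (ts : List Int) : List (List Int) :=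
  if cur = [] then altGroups ts
  else (cur ++ ts.takeWhile (fun x => !(x == 4000))) :: altGroups (ts.dropWhile (fun x => !(x == 4000)))

theorem loop_eq (ts : List Int) : ∀ (frames : List (List Int)) (cur : List Int),
    (let st := ts.foldl
      (fun (p : List (List Int) × List Int) time =>
        if time == 4000 then
          (if p.2 ≠ [] then (p.1 ++ [p.2], ([] : List Int)) else p)
        else
          (p.1, p.2 ++ [time]))
      (frames, cur)
     if st.2 ≠ [] then st.1 ++ [st.2] else st.1) = frames ++ auxGlue cur ts := by
  induction ts with
  | nil =>
    intro frames cur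
    by_cases h : cur = [] <;> simp [auxGlue, h, altGroups]
  | cons t ts ih =>
    intro frames cur
    rw [List.foldl_cons]
    by_cases ht : t = 4000
    · subst ht
      by_cases hc : cur = []
      · subst hc
        exact (ih frames []).trans (by simp [auxGlue, altGroups])
      · rw [if_pos (by decide : (((4000 : Int)) == 4000) = true),
            if_pos (show (frames, cur).2 ≠ [] by simpa using hc)]
        exact (ih (frames ++ [cur]) []).trans
          (by simp [auxGlue, hc, altGroups, List.append_assoc])
    · rw [if_neg (show ¬((t == 4000) = true) by simp [ht])]
      exact (ih frames (cur ++ [t])).trans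
        (by by_cases hc : cur = [] <;>
              simp [auxGlue, hc, ht, altGroups, List.append_assoc])

theorem find_frames_spec : Claim_equal_find_frames := by
  intro ts fg _
  show find_frames ts fg = find_frames_alt ts fg
  have := loop_eq ts [] []
  simpa [find_frames, find_frames_alt, auxGlue] using this
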